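-- pv_equiv track=rewrite | github.com/JasonGross/guarantees-based-mechanistic-interpretability | gbmi/utils/sequences.py | count_sequences_relaxed
-- ===== SOURCE A (Python) =====
-- import math
--
-- def count_sequences(
--     sequence_length: int, nonmax_count: int, num_nonmax_tok_choices: int
-- ) -> int:
--     """
--     Count the number of sequences of length sequence_length with exactly nonmax_count items less than or equal to max_nonmax_tok and the remaining tokens equal to a fixed value, where order matters
--     """
--     combinations = math.comb(sequence_length, nonmax_count)
--     token_variations = (
--         num_nonmax_tok_choices**nonmax_count if num_nonmax_tok_choices > 0 else 0
--     )
--     return combinations * token_variations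
--
-- def count_sequences_relaxed(
--     sequence_length: int, nonmax_count: int, num_nonmax_tok_choices: int
-- ) -> int:
--     """
--     Count the number of sequences of length sequence_length with at most nonmax_count items less than or equal to max_nonmax_tok and the remaining tokens equal to a fixed value, where order matters
--     """
--     total_count = 0
--     for i in range(nonmax_count + 1):
--         total_count += count_sequences(
--             sequence_length=sequence_length,
--             nonmax_count=i,
--             num_nonmax_tok_choices=num_nonmax_tok_choices,
--         )
--
--     return total_count
-- ===== SOURCE B (Python) =====
-- import math
--
-- def count_sequences_relaxed(
--     sequence_length: int, nonmax_count: int, num_nonmax_tok_choices: int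
-- ) -> int:
--     # Evaluate the polynomial sum_{i=0}^{nonmax_count} C(sequence_length, i) * k^i
--     # by Horner's scheme, folding from the highest coefficient down.
--     result = 0
--     for i in range(nonmax_count, -1, -1):
--         result = result * num_nonmax_tok_choices + math.comb(sequence_length, i)
--     return result
-- ===== Notes on version B (the rewrite author's own statement) =====
-- stated objective: alternative
-- what changed: Replaces the per-term comb*k**i summation (with a helper call per term) by a single descending Horner fold that accumulates the powers of k implicitly.
-- intended difference: When num_nonmax_tok_choices <= 0 and nonmax_count >= 0, A's zero-choices guard also zeroes the i=0 term and returns 0, while B returns the polynomial value sum C(L,i)*k^i (in particular 1 for k=0: the single all-max sequence), which is the intended count. — e.g. on count_sequences_relaxed(2, 1, 0): A returns 0, B returns 1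
import Mathlib
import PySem

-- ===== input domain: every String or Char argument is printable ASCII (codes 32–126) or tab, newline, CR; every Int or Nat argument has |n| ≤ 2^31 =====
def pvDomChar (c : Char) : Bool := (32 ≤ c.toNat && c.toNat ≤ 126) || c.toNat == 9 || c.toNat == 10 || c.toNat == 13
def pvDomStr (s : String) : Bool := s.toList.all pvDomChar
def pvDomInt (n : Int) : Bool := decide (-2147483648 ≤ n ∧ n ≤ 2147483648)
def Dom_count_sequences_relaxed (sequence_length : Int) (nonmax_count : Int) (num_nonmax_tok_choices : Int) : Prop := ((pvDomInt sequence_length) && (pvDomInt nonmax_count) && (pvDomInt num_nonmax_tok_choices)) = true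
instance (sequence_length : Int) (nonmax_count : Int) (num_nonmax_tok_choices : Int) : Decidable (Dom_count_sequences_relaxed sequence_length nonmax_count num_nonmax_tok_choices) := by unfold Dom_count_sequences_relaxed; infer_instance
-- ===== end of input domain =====

-- B evaluates the same polynomial by a single descending Horner fold; on num_nonmax_tok_choices ≤ 0
-- with nonmax_count ≥ 0 it returns the polynomial value (the intended count) where A returns 0 (D_ below).

-- ===== PORT A =====
-- math.comb n k (= C(n,k), 0 when k > n), by the standard exact multiplicative algorithm;
-- Python raises ValueError on negative arguments — those calls are excluded by Pre_,
-- the 'else 0' branch is never reached on admitted inputs.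
def combNat (n k : Nat) : Nat :=
  if n < k then 0
  else (List.range (min k (n - k))).foldl (fun acc i => acc * (n - i) / (i + 1)) 1

def pyComb (n k : Int) : Int := if 0 ≤ n ∧ 0 ≤ k then (combNat n.toNat k.toNat : Int) else 0

def count_sequences (sequence_length : Int) (nonmax_count : Int) (num_nonmax_tok_choices : Int) : Int :=
  let combinations := pyComb sequence_length nonmax_count
  -- k ** nonmax_count: nonmax_count is a nonnegative loop index at every call site, so toNat is exact
  let token_variations := if 0 < num_nonmax_tok_choices then num_nonmax_tok_choices ^ nonmax_count.toNat else 0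
  combinations * token_variations

def count_sequences_relaxed (sequence_length : Int) (nonmax_count : Int) (num_nonmax_tok_choices : Int) : Int :=
  (PySem.List.pyRange 0 (nonmax_count + 1) 1).foldl
    (fun total_count i => total_count + count_sequences sequence_length i num_nonmax_tok_choices) 0

-- ===== PORT B =====
def count_sequences_relaxed_alt (sequence_length : Int) (nonmax_count : Int) (num_nonmax_tok_choices : Int) : Int :=
  (PySem.List.pyRange nonmax_count (-1) (-1)).foldl
    (fun result i => result * num_nonmax_tok_choices + pyComb sequence_length i) 0

-- ===== PRECONDITION & SPEC =====
-- A raises ValueError (math.comb of a negative n) exactly when sequence_length < 0 and the loop runs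
-- (nonmax_count ≥ 0); B raises there too.
def Pre_count_sequences_relaxed (sequence_length : Int) (nonmax_count : Int) (num_nonmax_tok_choices : Int) : Prop :=
  0 ≤ sequence_length ∨ nonmax_count < 0
instance (sequence_length : Int) (nonmax_count : Int) (num_nonmax_tok_choices : Int) : Decidable (Pre_count_sequences_relaxed sequence_length nonmax_count num_nonmax_tok_choices) := by unfold Pre_count_sequences_relaxed; infer_instance

def pvWitness_count_sequences_relaxed : Int × Int × Int := (4, 2, 3)

-- When num_nonmax_tok_choices ≤ 0 and nonmax_count ≥ 0, A's zero-choices guard also zeroes the i = 0 term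
-- and returns 0, while B returns the polynomial value Σ C(L,i)·k^i (in particular 1 for k = 0: the single
-- all-max sequence), which is the intended count.
def D_count_sequences_relaxed (sequence_length : Int) (nonmax_count : Int) (num_nonmax_tok_choices : Int) : Prop :=
  num_nonmax_tok_choices ≤ 0 ∧ 0 ≤ nonmax_count
instance (sequence_length : Int) (nonmax_count : Int) (num_nonmax_tok_choices : Int) : Decidable (D_count_sequences_relaxed sequence_length nonmax_count num_nonmax_tok_choices) := by unfold D_count_sequences_relaxed; infer_instance

def Spec_count_sequences_relaxed (sequence_length : Int) (nonmax_count : Int) (num_nonmax_tok_choices : Int) (out : Int) : Prop := ¬ D_count_sequences_relaxed sequence_length nonmax_count num_nonmax_tok_choices → out = count_sequences_relaxed_alt sequence_length nonmax_count num_nonmax_tok_choices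
instance (sequence_length : Int) (nonmax_count : Int) (num_nonmax_tok_choices : Int) (out : Int) : Decidable (Spec_count_sequences_relaxed sequence_length nonmax_count num_nonmax_tok_choices out) := by unfold Spec_count_sequences_relaxed; infer_instance

def pvDiffWitness_count_sequences_relaxed : Int × Int × Int := (2, 1, 0)
def pvDiffWitnessOut_count_sequences_relaxed : Int × Int := (0, 1)

-- ===== CLAIM (what is proved, stated in full; the proofs are below) =====
def Claim_unchanged_count_sequences_relaxed : Prop := ∀ (sequence_length : Int) (nonmax_count : Int) (num_nonmax_tok_choices : Int), Dom_count_sequences_relaxed sequence_length nonmax_count num_nonmax_tok_choices → Pre_count_sequences_relaxed sequence_length nonmax_count num_nonmax_tok_choices → Spec_count_sequences_relaxed sequence_length nonmax_count num_nonmax_tok_choices (count_sequences_relaxed sequence_length nonmax_count num_nonmax_tok_choices)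
def Claim_changed_count_sequences_relaxed : Prop := Dom_count_sequences_relaxed (pvDiffWitness_count_sequences_relaxed.1) (pvDiffWitness_count_sequences_relaxed.2.1) (pvDiffWitness_count_sequences_relaxed.2.2) ∧ Pre_count_sequences_relaxed (pvDiffWitness_count_sequences_relaxed.1) (pvDiffWitness_count_sequences_relaxed.2.1) (pvDiffWitness_count_sequences_relaxed.2.2) ∧ D_count_sequences_relaxed (pvDiffWitness_count_sequences_relaxed.1) (pvDiffWitness_count_sequences_relaxed.2.1) (pvDiffWitness_count_sequences_relaxed.2.2) ∧ count_sequences_relaxed (pvDiffWitness_count_sequences_relaxed.1) (pvDiffWitness_count_sequences_relaxed.2.1) (pvDiffWitness_count_sequences_relaxed.2.2) = pvDiffWitnessOut_count_sequences_relaxed.1 ∧ count_sequences_relaxed_alt (pvDiffWitness_count_sequences_relaxed.1) (pvDiffWitness_count_sequences_relaxed.2.1) (pvDiffWitness_count_sequences_relaxed.2.2) = pvDiffWitnessOut_count_sequences_relaxed.2 ∧ pvDiffWitnessOut_count_sequences_relaxed.1 ≠ pvDiffWitnessOut_count_sequences_relaxed.2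

-- ===== LEMMAS AND PROOFS =====

-- reference polynomial Σ_{i=0}^{m} C(L,i)·k^i
def polyS (L k : Int) : Nat → Int
  | 0 => pyComb L 0
  | m + 1 => polyS L k m + pyComb L (m + 1) * k ^ (m + 1)

theorem portA_eq_polyS (L k : Int) (hk : 0 < k) (m : Nat) :
    count_sequences_relaxed L (m : Int) k = polyS L k m := by
  induction m with
  | zero =>
      unfold count_sequences_relaxed
      rw [show ((0 : Nat) : Int) + 1 = 0 + 1 by norm_num, PySem.List.pyRange_one_singleton]
      simp [polyS, count_sequences, hk]
  | succ m ih =>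
      have hsplit := PySem.List.pyRange_one_succ_right (a := 0) (b := (m : Int) + 1)
        (by omega)
      unfold count_sequences_relaxed at ih ⊢
      rw [show ((m + 1 : Nat) : Int) + 1 = ((m : Int) + 1) + 1 by omega,
        hsplit, List.foldl_append, ih]
      have htn : (((m : Int) + 1)).toNat = m + 1 := by omega
      simp [polyS, count_sequences, hk, htn]

theorem portB_horner (L k : Int) (m : Nat) (r : Int) :
    (PySem.List.pyRange (m : Int) (-1) (-1)).foldl
      (fun result i => result * k + pyComb L i) r = r * k ^ (m + 1) + polyS L k m := by
  induction m generalizing r with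
  | zero =>
      rw [PySem.List.pyRange_neg_one_cons (by norm_num),
          PySem.List.pyRange_neg_one_eq_nil (by norm_num)]
      simp [polyS]
  | succ m ih =>
      rw [show ((m + 1 : Nat) : Int) = (m : Int) + 1 by omega,
          PySem.List.pyRange_neg_one_cons (by omega)]
      simp only [List.foldl_cons, add_sub_cancel_right]
      rw [ih]
      have : ((m : Int) + 1) = ((m + 1 : Nat) : Int) := by omega
      rw [this]
      simp [polyS]
      ring

-- ===== VERDICT (by name: the statement is the Claim_ definition above) =====
theorem count_sequences_relaxed_spec : Claim_unchanged_count_sequences_relaxed := by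
  intro L nc k _ _ hD
  by_cases hnc : nc < 0
  · unfold count_sequences_relaxed count_sequences_relaxed_alt
    rw [PySem.List.pyRange_one_eq_nil (by omega), PySem.List.pyRange_neg_one_eq_nil (by omega)]
    rfl
  · have hk : 0 < k := by
      unfold D_count_sequences_relaxed at hD
      by_contra h
      exact hD ⟨by omega, by omega⟩
    obtain ⟨m, rfl⟩ : ∃ m : Nat, nc = (m : Int) := ⟨nc.toNat, by omega⟩
    rw [portA_eq_polyS L k hk m]
    unfold count_sequences_relaxed_alt
    rw [portB_horner L k m 0]
    ring

theorem count_sequences_relaxed_changed : Claim_changed_count_sequences_relaxed := by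
  unfold Claim_changed_count_sequences_relaxed; decide
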